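-- pv_equiv track=rewrite | github.com/diegodiaz93/fractalZE | FractalZE/cantor.py | lindenmayer
-- ===== SOURCE A (Python) =====
-- def lindenmayer(n=0):
--     """Devuelve el fractal de cantor expresado en L-System.
--     @param n: termino de la sucesion
--     @type n: int
--     @return: termino expresado en L-system.
--     @rtype: string
--
--     Algoritmo en L-System.
--         - variables: _ (space)
--         - constantes:
--         - axioma: _
--         - reglas:
--             1. _ -> _ _
--             2. (space) -> (space)(space)(space)
--
--     Interpretacion.
--         1. Un _(guion bajo) significa dibujar un segmento
--         2. Un (space) significa avanzar la longitud de un segmento sin dibujar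
--
--     """
--
--     lindenmayer = '_'
--     for i in range(n):
--         newTerm = ''
--         for l in lindenmayer:
--             if(l == '_'):
--                 newTerm += '_ _'
--             else:
--                 newTerm += '   '
--         lindenmayer = newTerm
--     return lindenmayer
-- ===== SOURCE B (Python) =====
-- def lindenmayer(n=0):
--     """Cantor L-system term via the closed-form index->character rule:
--     position i of the n-th term is '_' iff no base-3 digit of i equals 1."""
--     m = n if n > 0 else 0
--     length = 3 ** m
--     chars = []
--     for i in range(length):
--         x = i
--         c = '_'
--         for _ in range(m):
--             if x % 3 == 1:
--                 c = ' '
--                 break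
--             x //= 3
--         chars.append(c)
--     return ''.join(chars)
-- ===== Notes on version B (the rewrite author's own statement) =====
-- stated objective: alternative
-- what changed: Replaces the level-by-level L-system substitution loop with a direct closed-form mapping over range(3**n): a position is drawn as an underscore exactly when no base-3 digit of its index is the middle digit (the Cantor middle-thirds condition), otherwise a space.
import Mathlib
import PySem

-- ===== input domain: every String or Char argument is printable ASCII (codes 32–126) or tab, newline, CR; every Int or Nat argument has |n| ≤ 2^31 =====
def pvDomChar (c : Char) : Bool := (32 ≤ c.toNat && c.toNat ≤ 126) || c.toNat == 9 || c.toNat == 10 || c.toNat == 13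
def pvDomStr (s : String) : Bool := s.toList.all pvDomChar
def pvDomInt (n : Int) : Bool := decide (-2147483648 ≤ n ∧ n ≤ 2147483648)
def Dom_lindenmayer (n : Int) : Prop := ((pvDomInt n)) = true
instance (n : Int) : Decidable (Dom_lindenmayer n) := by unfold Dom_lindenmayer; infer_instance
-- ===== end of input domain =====

-- B replaces A's iterated substitution by the closed-form base-3 digit rule; alternative decomposition, not faster.

-- ===== PORT A =====
-- inner loop: newTerm += '_ _' or '   ' per character
def lindStep (l : List Char) : List Char :=
  l.foldl (fun acc ch => acc ++ (if ch = '_' then ['_', ' ', '_'] else [' ', ' ', ' '])) []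

-- outer loop: for i in range(n), state is the current string
def lindLoop : Nat → List Char → List Char
  | 0, l => l
  | k + 1, l => lindLoop k (lindStep l)

def lindenmayer (n : Int) : String :=
  String.ofList (lindLoop n.toNat ['_'])

-- ===== PORT B =====
-- inner loop of Source B: scan up to m base-3 digits of x, ' ' at the first digit 1
def cantorChar : Nat → Nat → Char
  | 0, _ => '_'
  | m + 1, x => if x % 3 = 1 then ' ' else cantorChar m (x / 3)

def lindenmayer_alt (n : Int) : String :=
  String.ofList ((List.range (3 ^ n.toNat)).map (fun i => cantorChar n.toNat i))

-- ===== PRECONDITION & SPEC =====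
def Spec_lindenmayer (n : Int) (out : String) : Prop := out = lindenmayer_alt n
instance (n : Int) (out : String) : Decidable (Spec_lindenmayer n out) := by unfold Spec_lindenmayer; infer_instance

-- ===== CLAIM (what is proved, stated in full; the proofs are below) =====
def Claim_equal_lindenmayer : Prop := ∀ (n : Int), Dom_lindenmayer n → Spec_lindenmayer n (lindenmayer n)

-- ===== LEMMAS AND PROOFS =====

lemma lindStep_eq_flatMap (l : List Char) :
    lindStep l = l.flatMap (fun ch => if ch = '_' then ['_', ' ', '_'] else [' ', ' ', ' ']) := by
  simpa [lindStep] using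
    PySem.List.foldl_append_eq_flatMap
      (fun ch => if ch = '_' then ['_', ' ', '_'] else [' ', ' ', ' ']) l []

lemma lindLoop_succ' (k : Nat) (l : List Char) :
    lindLoop (k + 1) l = lindStep (lindLoop k l) := by
  induction k generalizing l with
  | zero => rfl
  | succ k ih => exact ih (lindStep l)

-- flatMap of constant-length-3 blocks over range N = map over range (3*N)
lemma flatMap_triple (N : Nat) (h : Nat → Nat → Char) :
    (List.range N).flatMap (fun i => [h i 0, h i 1, h i 2]) =
      (List.range (3 * N)).map (fun j => h (j / 3) (j % 3)) := by
  induction N with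
  | zero => simp
  | succ N ih =>
    have e3 : 3 * (N + 1) = (3 * N + 1 + 1) + 1 := by ring
    rw [List.range_succ, List.flatMap_append, ih, e3,
      List.range_succ, List.range_succ, List.range_succ]
    have d0 : (3 * N) / 3 = N ∧ (3 * N) % 3 = 0 := by omega
    have d1 : (3 * N + 1) / 3 = N ∧ (3 * N + 1) % 3 = 1 := by omega
    have d2 : (3 * N + 1 + 1) / 3 = N ∧ (3 * N + 1 + 1) % 3 = 2 := by omega
    simp [d0.1, d0.2, d1.1, d1.2, d2.1, d2.2]

lemma cantorChar_cases (m x : Nat) : cantorChar m x = '_' ∨ cantorChar m x = ' ' := by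
  induction m generalizing x with
  | zero => left; rfl
  | succ m ih =>
    by_cases h : x % 3 = 1
    · right; simp [cantorChar, h]
    · simpa [cantorChar, h] using ih (x / 3)

lemma step_cantor (m : Nat) :
    lindStep ((List.range (3 ^ m)).map (cantorChar m)) =
      (List.range (3 ^ (m + 1))).map (cantorChar (m + 1)) := by
  rw [lindStep_eq_flatMap, List.flatMap_map]
  have hh : ∀ i : Nat,
      (if cantorChar m i = '_' then ['_', ' ', '_'] else [' ', ' ', ' ']) =
        [(fun i r => if r = 1 then ' ' else cantorChar m i) i 0,
         (fun i r => if r = 1 then ' ' else cantorChar m i) i 1,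
         (fun i r => if r = 1 then ' ' else cantorChar m i) i 2] := by
    intro i
    rcases cantorChar_cases m i with hc | hc <;> simp [hc]
  calc (List.range (3 ^ m)).flatMap
          (fun i => if cantorChar m i = '_' then ['_', ' ', '_'] else [' ', ' ', ' '])
      = (List.range (3 ^ m)).flatMap
          (fun i => [(fun i r => if r = 1 then ' ' else cantorChar m i) i 0,
                     (fun i r => if r = 1 then ' ' else cantorChar m i) i 1,
                     (fun i r => if r = 1 then ' ' else cantorChar m i) i 2]) := by
        exact List.flatMap_congr (fun i _ => hh i)
    _ = (List.range (3 * 3 ^ m)).map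
          (fun j => if j % 3 = 1 then ' ' else cantorChar m (j / 3)) :=
        flatMap_triple (3 ^ m) (fun i r => if r = 1 then ' ' else cantorChar m i)
    _ = (List.range (3 ^ (m + 1))).map (cantorChar (m + 1)) := by
        rw [pow_succ, Nat.mul_comm]
        exact List.map_congr_left (fun j _ => rfl)

lemma lindLoop_eq_cantor (m : Nat) :
    lindLoop m ['_'] = (List.range (3 ^ m)).map (cantorChar m) := by
  induction m with
  | zero => simp [lindLoop, cantorChar]
  | succ m ih => rw [lindLoop_succ', ih, step_cantor]

-- ===== VERDICT (by name: the statement is the Claim_ definition above) =====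
theorem lindenmayer_spec : Claim_equal_lindenmayer := by
  intro n _
  show _ = _
  unfold lindenmayer lindenmayer_alt
  rw [lindLoop_eq_cantor]
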